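-- pv_equiv track=rewrite | github.com/benquick123/code-profiling | code/batch-2/dn7 - minolovec/M-17078-2411.py | zapisi_pot
-- ===== SOURCE A (Python) =====
-- def dolzina_poti(pot):
--     """
--     Vrni dolžino podane poti, vključno z vmesnimi polji.
--
--     Args:
--         pot (list of tuple): seznam koordinat polj
--
--     Returns:
--         int: dolžina poti
--     """
--     return sum([abs(pot[i + 1][0] - pot[i][0]) + abs(pot[i + 1][1] - pot[i][1]) for i in range(len(pot)-1)])
--
-- def zapisi_pot(pot):
--     """
--     Za podano pot vrni seznam ukazov (glej navodila naloge).
--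
--     Args:
--         pot (list of tuple of int): pot
--
--     Returns:
--         str: ukazi, napisani po vrsticah
--     """
--     tab = []
--     smer = 0
--     for i in range(len(pot)-1):
--         if pot[i][0] < pot[i+1][0]:
--             nova_smer = 1
--         elif pot[i][0] > pot[i+1][0]:
--             nova_smer = 3
--         elif pot[i][1] < pot[i+1][1]:
--             nova_smer = 2
--         else:
--             nova_smer = 0
--         for k in range(abs(nova_smer - smer)):
--             if nova_smer - smer >= 0:
--                 tab.append("DESNO")
--             else:
--                 tab.append("LEVO")
--         tab.append(str(dolzina_poti([(pot[i][0], pot[i][1]), (pot[i+1][0], pot[i+1][1])])))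
--         smer = nova_smer
--     return "\n".join(tab)
-- ===== SOURCE B (Python) =====
-- _TURNS = {
--     (0, 0): [], (0, 1): ["DESNO"], (0, 2): ["DESNO", "DESNO"], (0, 3): ["DESNO", "DESNO", "DESNO"],
--     (1, 0): ["LEVO"], (1, 1): [], (1, 2): ["DESNO"], (1, 3): ["DESNO", "DESNO"],
--     (2, 0): ["LEVO", "LEVO"], (2, 1): ["LEVO"], (2, 2): [], (2, 3): ["DESNO"],
--     (3, 0): ["LEVO", "LEVO", "LEVO"], (3, 1): ["LEVO", "LEVO"], (3, 2): ["LEVO"], (3, 3): [],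
-- }
--
-- def zapisi_pot(pot):
--     def go(p, smer):
--         if len(p) < 2:
--             return []
--         (x0, y0), (x1, y1) = p[0], p[1]
--         nova = 1 if x0 < x1 else 3 if x0 > x1 else 2 if y0 < y1 else 0
--         return _TURNS[(smer, nova)] + [str(abs(x1 - x0) + abs(y1 - y0))] + go(p[1:], nova)
--     return "\n".join(go(pot, 0))
-- ===== Notes on version B (the rewrite author's own statement) =====
-- stated objective: alternative
-- what changed: B replaces A's iterative index loop with an inner sign-counting loop and a helper-function distance call by a structurally recursive pass over the list that looks the turn-command block up in a precomputed 16-entry (previous dir, new dir) -> commands table and inlines the Manhattan distance.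
import Mathlib
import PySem

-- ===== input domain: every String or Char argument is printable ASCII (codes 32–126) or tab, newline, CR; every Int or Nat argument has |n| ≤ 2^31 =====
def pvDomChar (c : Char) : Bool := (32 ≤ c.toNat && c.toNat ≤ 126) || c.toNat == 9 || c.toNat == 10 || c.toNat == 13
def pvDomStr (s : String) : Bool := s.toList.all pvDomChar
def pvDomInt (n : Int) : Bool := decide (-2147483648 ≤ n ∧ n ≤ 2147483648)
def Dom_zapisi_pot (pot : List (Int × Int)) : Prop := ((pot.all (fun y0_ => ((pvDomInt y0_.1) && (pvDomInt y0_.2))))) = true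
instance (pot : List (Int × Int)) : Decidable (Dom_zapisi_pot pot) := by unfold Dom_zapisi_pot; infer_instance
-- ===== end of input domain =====

-- B replaces A's iterative index loop (with its inner sign-counting loop and helper distance
-- call) by a structurally recursive pass that looks the turn block up in a precomputed
-- 16-entry (previous dir, new dir) table and inlines the distance; objective: alternative.

-- ===== PORT A =====
def dolzina_poti (pot : List (Int × Int)) : Int :=
  ((PySem.List.pyRange 0 ((pot.length : Int) - 1) 1).map (fun i =>
      (((PySem.List.pyGetD pot (i+1) (0,0)).1 - (PySem.List.pyGetD pot i (0,0)).1).natAbs : Int)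
      + (((PySem.List.pyGetD pot (i+1) (0,0)).2 - (PySem.List.pyGetD pot i (0,0)).2).natAbs : Int))).sum

def zapisi_pot (pot : List (Int × Int)) : String :=
  let st := (PySem.List.pyRange 0 ((pot.length : Int) - 1) 1).foldl
    (fun (st : List String × Int) i =>
      let tab := st.1
      let smer := st.2
      let pi := PySem.List.pyGetD pot i ((0:Int),(0:Int))
      let pj := PySem.List.pyGetD pot (i+1) ((0:Int),(0:Int))
      let nova : Int := if pi.1 < pj.1 then 1 else if pi.1 > pj.1 then 3 else if pi.2 < pj.2 then 2 else 0
      let tab := (PySem.List.pyRange 0 (((nova - smer).natAbs : Nat) : Int) 1).foldl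
        (fun t _ => t ++ [if nova - smer ≥ 0 then "DESNO" else "LEVO"]) tab
      let tab := tab ++ [PySem.Int.toStr (dolzina_poti [(pi.1, pi.2), (pj.1, pj.2)])]
      (tab, nova)) ([], 0)
  PySem.Str.join "\n" st.1

-- ===== PORT B =====
-- the _TURNS dict literal of Source B
def pvTurns : PySem.Dict (Int × Int) (List String) := PySem.Dict.ofList
  [ ((0, 0), []), ((0, 1), ["DESNO"]), ((0, 2), ["DESNO", "DESNO"]), ((0, 3), ["DESNO", "DESNO", "DESNO"])
  , ((1, 0), ["LEVO"]), ((1, 1), []), ((1, 2), ["DESNO"]), ((1, 3), ["DESNO", "DESNO"])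
  , ((2, 0), ["LEVO", "LEVO"]), ((2, 1), ["LEVO"]), ((2, 2), []), ((2, 3), ["DESNO"])
  , ((3, 0), ["LEVO", "LEVO", "LEVO"]), ((3, 1), ["LEVO", "LEVO"]), ((3, 2), ["LEVO"]), ((3, 3), []) ]

-- Source B's inner 'go': structural recursion over the path (p[1:] = the tail); _TURNS[(smer, nova)]
-- is Dict.getD with default [] — exact here, since every reachable key (dirs 0..3) is in the table.
def pvGo : List (Int × Int) → Int → List String
  | p0 :: p1 :: rest, smer =>
      let nova : Int := if p0.1 < p1.1 then 1 else if p0.1 > p1.1 then 3 else if p0.2 < p1.2 then 2 else 0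
      PySem.Dict.getD pvTurns (smer, nova) []
        ++ [PySem.Int.toStr (((p1.1 - p0.1).natAbs : Int) + ((p1.2 - p0.2).natAbs : Int))]
        ++ pvGo (p1 :: rest) nova
  | _, _ => []

def zapisi_pot_alt (pot : List (Int × Int)) : String :=
  PySem.Str.join "\n" (pvGo pot 0)

-- ===== PRECONDITION & SPEC =====
def Spec_zapisi_pot (pot : List (Int × Int)) (out : String) : Prop := out = zapisi_pot_alt pot
instance (pot : List (Int × Int)) (out : String) : Decidable (Spec_zapisi_pot pot out) := by unfold Spec_zapisi_pot; infer_instance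

-- ===== CLAIM (what is proved, stated in full; the proofs are below) =====
def Claim_equal_zapisi_pot : Prop := ∀ (pot : List (Int × Int)), Dom_zapisi_pot pot → Spec_zapisi_pot pot (zapisi_pot pot)

-- ===== LEMMAS AND PROOFS =====

-- appending a constant once per element = appending replicate length
theorem pv_foldl_const_append {a : Type} (l : List a) (s : String) (t : List String) :
    l.foldl (fun acc _ => acc ++ [s]) t = t ++ List.replicate l.length s := by
  induction l generalizing t with
  | nil => simp
  | cons x xs ih => rw [List.foldl_cons, ih]; simp [List.replicate_succ]

theorem pv_foldl_range_const (k : Nat) (s : String) (t : List String) :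
    (PySem.List.pyRange 0 ((k : Nat) : Int) 1).foldl (fun acc _ => acc ++ [s]) t
      = t ++ List.replicate k s := by
  rw [pv_foldl_const_append]
  simp [PySem.List.length_pyRange_one]

-- dolzina_poti on a two-element list is the Manhattan distance
theorem pv_dolzina_pair (a b c d : Int) :
    dolzina_poti [(a,b),(c,d)] = ((c-a).natAbs : Int) + ((d-b).natAbs : Int) := by
  have h2 : PySem.List.pyRange 0 1 1 = [0] := by decide
  have h1 : ((([(a,b),(c,d)] : List (Int × Int)).length : Int) - 1) = 1 := by simp
  have h3 : PySem.List.pyGetD [(a,b),(c,d)] 1 ((0:Int),(0:Int)) = (c,d) := by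
    rw [PySem.List.pyGetD_eq_getElem _ _ (by norm_num) (by simp)]; rfl
  simp only [dolzina_poti, h1, h2, List.map_cons, List.map_nil, List.sum_cons, List.sum_nil]
  simp [PySem.List.pyGetD_zero_cons, h3]

-- A's index loop over range(len-1) accessing pot[i], pot[i+1] is a fold over adjacent pairs
theorem pv_foldl_pairs {s : Type} (pot : List (Int × Int)) (f : s → (Int × Int) → (Int × Int) → s) (init : s) :
    (PySem.List.pyRange 0 ((pot.length : Int) - 1) 1).foldl
      (fun st i => f st (PySem.List.pyGetD pot i ((0:Int),(0:Int))) (PySem.List.pyGetD pot (i+1) ((0:Int),(0:Int)))) init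
      = (pot.zip (pot.drop 1)).foldl (fun st p => f st p.1 p.2) init := by
  cases pot with
  | nil => rw [PySem.List.pyRange_one_eq_nil (by simp)]; simp
  | cons a rest =>
    set zs := (a :: rest).zip ((a :: rest).drop 1) with hzs
    have hzlen : zs.length = rest.length := by simp [hzs, List.length_zip]
    have hb : (((a :: rest).length : Int) - 1) = (zs.length : Int) := by
      rw [hzlen]; simp
    rw [hb]
    have hcong : ∀ (st : s) (i : Int), i ∈ PySem.List.pyRange 0 ((zs.length : Int)) 1 →
        f st (PySem.List.pyGetD (a :: rest) i ((0:Int),(0:Int))) (PySem.List.pyGetD (a :: rest) (i+1) ((0:Int),(0:Int)))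
        = f st (PySem.List.pyGetD zs i (((0:Int),(0:Int)),((0:Int),(0:Int)))).1
               (PySem.List.pyGetD zs i (((0:Int),(0:Int)),((0:Int),(0:Int)))).2 := by
      intro st i hi
      rw [PySem.List.mem_pyRange_one] at hi
      obtain ⟨h0, h1⟩ := hi
      rw [hzlen] at h1
      have hlt1 : i < ((a :: rest).length : Int) := by simp; omega
      have hlt2 : i + 1 < ((a :: rest).length : Int) := by simp; omega
      have h1' : i < (zs.length : Int) := by rw [hzlen]; omega
      rw [PySem.List.pyGetD_eq_getElem _ _ h0 hlt1,
          PySem.List.pyGetD_eq_getElem _ _ (by omega) hlt2,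
          PySem.List.pyGetD_eq_getElem _ _ h0 h1']
      have htn : (i + 1).toNat = i.toNat + 1 := by omega
      simp [hzs, List.getElem_zip, htn]
    rw [PySem.List.foldl_congr_mem _ _ _ init hcong]
    simpa using PySem.List.foldl_pyRange_zero_pyGetD' zs (((0:Int),(0:Int)),((0:Int),(0:Int)))
      (fun st p => f st p.1 p.2) init

-- A's computed sign loop emits exactly the table entry, for direction codes 0..3
theorem pv_turn_table (smer nova : Int)
    (hs : smer = 0 ∨ smer = 1 ∨ smer = 2 ∨ smer = 3)
    (hn : nova = 0 ∨ nova = 1 ∨ nova = 2 ∨ nova = 3) :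
    List.replicate (nova - smer).natAbs (if nova - smer ≥ 0 then "DESNO" else "LEVO")
      = PySem.Dict.getD pvTurns (smer, nova) [] := by
  rcases hs with h | h | h | h <;> subst h <;>
    rcases hn with h | h | h | h <;> subst h <;> decide

-- A's fold over adjacent pairs produces tab ++ pvGo pot smer
theorem pv_fold_go (pot : List (Int × Int)) (tab : List String) (smer : Int)
    (hs : smer = 0 ∨ smer = 1 ∨ smer = 2 ∨ smer = 3) :
    ((pot.zip (pot.drop 1)).foldl (fun (st : List String × Int) p =>
      let nova : Int := if p.1.1 < p.2.1 then 1 else if p.1.1 > p.2.1 then 3 else if p.1.2 < p.2.2 then 2 else 0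
      ((PySem.List.pyRange 0 (((nova - st.2).natAbs : Nat) : Int) 1).foldl
        (fun t _ => t ++ [if nova - st.2 ≥ 0 then "DESNO" else "LEVO"]) st.1
       ++ [PySem.Int.toStr (dolzina_poti [(p.1.1, p.1.2), (p.2.1, p.2.2)])], nova)) (tab, smer)).1
    = tab ++ pvGo pot smer := by
  induction pot generalizing tab smer with
  | nil => simp [pvGo]
  | cons a tl ih =>
    cases tl with
    | nil => simp [pvGo]
    | cons b rest =>
      have hzip : ((a :: b :: rest).zip ((a :: b :: rest).drop 1))
          = (a, b) :: ((b :: rest).zip ((b :: rest).drop 1)) := by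
        simp [List.zip]
      rw [hzip, List.foldl_cons]
      set nova : Int := if a.1 < b.1 then 1 else if a.1 > b.1 then 3 else if a.2 < b.2 then 2 else 0 with hnova
      have hn : nova = 0 ∨ nova = 1 ∨ nova = 2 ∨ nova = 3 := by
        rw [hnova]; split_ifs <;> simp
      simp only
      rw [ih _ nova hn]
      simp only [pv_foldl_range_const, pv_dolzina_pair, pv_turn_table smer nova hs hn]
      simp [pvGo, ← hnova]

-- ===== VERDICT (by name: the statement is the Claim_ definition above) =====
theorem zapisi_pot_spec : Claim_equal_zapisi_pot := by
  intro pot _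
  show zapisi_pot pot = zapisi_pot_alt pot
  have h1 := pv_foldl_pairs pot (fun st pi pj =>
      let nova : Int := if pi.1 < pj.1 then 1 else if pi.1 > pj.1 then 3 else if pi.2 < pj.2 then 2 else 0
      ((PySem.List.pyRange 0 (((nova - st.2).natAbs : Nat) : Int) 1).foldl
        (fun t _ => t ++ [if nova - st.2 ≥ 0 then "DESNO" else "LEVO"]) st.1
       ++ [PySem.Int.toStr (dolzina_poti [(pi.1, pi.2), (pj.1, pj.2)])], nova))
      (([], 0) : List String × Int)
  have h2 := pv_fold_go pot [] 0 (Or.inl rfl)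
  show PySem.Str.join "\n" _ = _
  rw [zapisi_pot_alt]
  exact congrArg (PySem.Str.join "\n") ((congrArg Prod.fst h1).trans h2)
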